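-- pv_equiv track=rewrite | github.com/baeseongjae/Algorithm | 프로그래머스/2/42626. 더 맵게/더 맵게.py | solution
-- ===== SOURCE A (Python) =====
-- import heapq
--
-- def solution(scoville, K):
--     heap = []
--     answer = 0
--
--     for i in scoville:
--         heapq.heappush(heap, i)
--
--     while heap[0] < K:
--         heapq.heappush(heap, heapq.heappop(heap) + heapq.heappop(heap) * 2)
--         answer += 1
--
--         if len(heap) < 2 and heap[0] < K:
--             return -1
--     return answer
-- ===== SOURCE B (Python) =====
-- def _insort(lst, x):
--     i = 0
--     while i < len(lst) and lst[i] <= x: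
--         i += 1
--     lst.insert(i, x)
--
-- def solution(scoville, K):
--     lst = sorted(scoville)
--     answer = 0
--     while lst[0] < K:
--         first = lst.pop(0)
--         second = lst.pop(0)
--         _insort(lst, first + second * 2)
--         answer += 1
--         if len(lst) < 2 and lst[0] < K:
--             return -1
--     return answer
-- ===== Notes on version B (the rewrite author's own statement) =====
-- stated objective: alternative
-- what changed: Replaces the binary heap (heapq push/pop with sift operations) by a plain sorted list: sort once, take the two smallest from the front by pop(0), and re-insert the mixed value with a linear ordered insert.
import Mathlib
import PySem

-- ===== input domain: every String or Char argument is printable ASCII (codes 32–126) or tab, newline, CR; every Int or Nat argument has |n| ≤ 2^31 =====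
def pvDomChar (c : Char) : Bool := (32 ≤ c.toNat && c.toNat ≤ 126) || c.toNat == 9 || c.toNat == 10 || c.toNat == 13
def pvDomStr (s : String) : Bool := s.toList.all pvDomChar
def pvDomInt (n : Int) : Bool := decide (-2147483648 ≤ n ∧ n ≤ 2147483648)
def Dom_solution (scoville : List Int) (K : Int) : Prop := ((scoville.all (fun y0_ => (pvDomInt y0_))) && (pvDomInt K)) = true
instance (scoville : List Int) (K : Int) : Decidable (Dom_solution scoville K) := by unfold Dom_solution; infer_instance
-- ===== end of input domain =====

-- B replaces A's binary heap (heapq) by a once-sorted list with front pops and an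
-- ordered re-insert: a different data structure of similar cost (not claimed faster).

-- ===== PORT A =====
-- heapq.heappush / heapq.heappop are ported as CPython's actual binary-heap
-- algorithms (_siftdown / _siftup) on a List Int (exact step-for-step; list indices
-- are always in range when called as heapq calls them, so .getD reads are exact).

-- CPython _siftdown's while loop (newitem = heap[pos] is read by the wrapper below)
def siftdownAux (heap : List Int) (startpos pos : Nat) (newitem : Int) : List Int :=
  if _h : startpos < pos then
    let parentpos := (pos - 1) / 2
    let parent := heap.getD parentpos 0
    if newitem < parent then
      siftdownAux (heap.set pos parent) startpos parentpos newitem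
    else heap.set pos newitem
  else heap.set pos newitem
  termination_by pos
  decreasing_by omega

def siftdown (heap : List Int) (startpos pos : Nat) : List Int :=
  siftdownAux heap startpos pos (heap.getD pos 0)

-- CPython _siftup's while loop (endpos = len(heap) is read once by the wrapper)
def siftupAux (heap : List Int) (endpos startpos pos : Nat) (newitem : Int) : List Int :=
  let childpos := 2 * pos + 1
  if _h : childpos < endpos then
    let childpos' := if childpos + 1 < endpos ∧ ¬ heap.getD childpos 0 < heap.getD (childpos + 1) 0
      then childpos + 1 else childpos
    siftupAux (heap.set pos (heap.getD childpos' 0)) endpos startpos childpos' newitem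
  else
    siftdownAux (heap.set pos newitem) startpos pos newitem
  termination_by endpos - pos
  decreasing_by split <;> omega

def siftup (heap : List Int) (pos : Nat) : List Int :=
  siftupAux heap heap.length pos pos (heap.getD pos 0)

def heappush (heap : List Int) (item : Int) : List Int :=
  siftdown (heap ++ [item]) 0 ((heap ++ [item]).length - 1)

def heappop (heap : List Int) : Int × List Int :=
  let lastelt := heap.getD (heap.length - 1) 0
  let heap1 := heap.dropLast
  if heap1.length ≠ 0 then
    (heap1.getD 0 0, siftup (heap1.set 0 lastelt) 0)
  else (lastelt, heap1)

-- A's while loop; fuel = initial heap size (inside Pre_ the loop exits before fuel runs out)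
def solLoopA (K : Int) : Nat → List Int → Int → Int
  | 0, _, ans => ans
  | fuel + 1, heap, ans =>
    if heap.getD 0 0 < K then
      let p1 := heappop heap
      let p2 := heappop p1.2
      let heap3 := heappush p2.2 (p1.1 + p2.1 * 2)
      if heap3.length < 2 ∧ heap3.getD 0 0 < K then -1
      else solLoopA K fuel heap3 (ans + 1)
    else ans

def solution (scoville : List Int) (K : Int) : Int :=
  solLoopA K scoville.length (scoville.foldl (fun h i => heappush h i) []) 0

-- ===== PORT B =====
-- Source B's _insort: linear scan past the ≤-elements, insert before the first greater one
def insortList : List Int → Int → List Int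
  | [], x => [x]
  | y :: ys, x => if x < y then x :: y :: ys else y :: insortList ys x

-- needed by bLoop's termination measure
lemma insortList_length (l : List Int) (x : Int) : (insortList l x).length = l.length + 1 := by
  induction l with
  | nil => rfl
  | cons y ys ih => simp only [insortList]; split <;> simp [ih]

-- Source B's while loop (on the singleton list with head < K the Python raises; Pre_ excludes
-- reaching that state, the port returns the accumulator there)
def bLoop (K : Int) : List Int → Int → Int
  | [], ans => ans
  | [_], ans => ans
  | x :: y :: rest, ans =>
    if x < K then
      let nlst := insortList rest (x + y * 2)
      if nlst.length < 2 ∧ nlst.getD 0 0 < K then -1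
      else bLoop K nlst (ans + 1)
    else ans
  termination_by l => l.length
  decreasing_by simp [insortList_length]

def solution_alt (scoville : List Int) (K : Int) : Int :=
  bLoop K (PySem.List.sorted scoville (fun v => v) false) 0

-- ===== PRECONDITION & SPEC =====
-- Pre_ excludes exactly the inputs where both Pythons raise IndexError: the empty list
-- (heap[0] / lst[0]) and a single element below K (the second heappop / pop(0)).
def Pre_solution (scoville : List Int) (K : Int) : Prop :=
  scoville ≠ [] ∧ (scoville.length = 1 → K ≤ scoville.headD 0)
instance (scoville : List Int) (K : Int) : Decidable (Pre_solution scoville K) := by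
  unfold Pre_solution; infer_instance

def pvWitness_solution : List Int × Int := ([1, 2, 9], 7)

def Spec_solution (scoville : List Int) (K : Int) (out : Int) : Prop := out = solution_alt scoville K
instance (scoville : List Int) (K : Int) (out : Int) : Decidable (Spec_solution scoville K out) := by
  unfold Spec_solution; infer_instance

-- ===== CLAIM (what is proved, stated in full; the proofs are below) =====
def Claim_equal_solution : Prop := ∀ (scoville : List Int) (K : Int), Dom_solution scoville K → Pre_solution scoville K → Spec_solution scoville K (solution scoville K)

-- ===== LEMMAS AND PROOFS =====
-- getD/set bookkeeping
lemma getD_set_self (l : List Int) (i : Nat) (x : Int) (h : i < l.length) :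
    (l.set i x).getD i 0 = x := by
  simp [List.getD_eq_getElem?_getD, h]

lemma getD_set_ne (l : List Int) (i j : Nat) (x : Int) (h : i ≠ j) :
    (l.set i x).getD j 0 = l.getD j 0 := by
  simp [List.getD_eq_getElem?_getD, h]

lemma getD_eq_getElem (l : List Int) (i : Nat) (h : i < l.length) : l.getD i 0 = l[i] := by
  simp [List.getD_eq_getElem?_getD, List.getElem?_eq_getElem h]

lemma getD_mem (l : List Int) (i : Nat) (h : i < l.length) : l.getD i 0 ∈ l := by
  rw [getD_eq_getElem l i h]; exact List.getElem_mem h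

lemma mset_set : ∀ (l : List Int) (i : Nat) (x : Int), i < l.length →
    ((l.set i x : List Int) : Multiset Int) = x ::ₘ ((l : Multiset Int).erase (l.getD i 0))
  | [], i, x, h => by simp at h
  | a :: t, 0, x, _ => by simp
  | a :: t, i + 1, x, h => by
    have h' : i < t.length := by simpa using h
    have ih := mset_set t i x h'
    have hset : ((a :: t).set (i + 1) x : Multiset Int)
        = a ::ₘ ((t.set i x : List Int) : Multiset Int) := rfl
    have hgd : (a :: t).getD (i + 1) 0 = t.getD i 0 := rfl
    have hcoe : ((a :: t : List Int) : Multiset Int) = a ::ₘ (t : Multiset Int) := rfl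
    rw [hset, hgd, ih, hcoe, Multiset.cons_swap]
    congr 1
    by_cases hc : t.getD i 0 = a
    · rw [hc, Multiset.erase_cons_head]
      exact Multiset.cons_erase (by exact_mod_cast (hc ▸ getD_mem t i h'))
    · rw [Multiset.erase_cons_tail _ (fun hh => hc hh.symm)]

lemma mset_swap (l : List Int) (i j : Nat) (x : Int) (hij : i ≠ j)
    (hi : i < l.length) (hj : j < l.length) :
    (((l.set i (l.getD j 0)).set j x : List Int) : Multiset Int)
      = ((l.set i x : List Int) : Multiset Int) := by
  have hlen : j < (l.set i (l.getD j 0)).length := by simpa using hj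
  rw [mset_set _ j x hlen, getD_set_ne l i j _ hij, mset_set l i _ hi,
    Multiset.erase_cons_head, mset_set l i x hi]

lemma length_of_mset_eq {l s : List Int} (h : (l : Multiset Int) = (s : Multiset Int)) :
    l.length = s.length := by
  have := congrArg Multiset.card h
  simpa using this
-- the binary-heap invariant and the root-is-minimum property
def IsHeap (l : List Int) : Prop :=
  ∀ i : Nat, 0 < i → i < l.length → l.getD ((i - 1) / 2) 0 ≤ l.getD i 0

lemma heap_root_le (l : List Int) (hH : IsHeap l) :
    ∀ i : Nat, i < l.length → l.getD 0 0 ≤ l.getD i 0 := by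
  intro i
  induction i using Nat.strong_induction_on with
  | _ i ih =>
    intro hi
    rcases Nat.eq_zero_or_pos i with h0 | h0
    · simp [h0]
    · exact le_trans (ih ((i - 1) / 2) (by omega) (by omega)) (hH i h0 hi)

lemma heap_root_le_mem (l : List Int) (hH : IsHeap l) (x : Int) (hx : x ∈ l) :
    l.getD 0 0 ≤ x := by
  rcases List.mem_iff_getElem.mp hx with ⟨i, hi, rfl⟩
  rw [← getD_eq_getElem l i hi]
  exact heap_root_le l hH i hi

lemma pairwise_head_le {z : Int} {t : List Int} (hs : (z :: t).Pairwise (· ≤ ·)) :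
    ∀ y ∈ z :: t, z ≤ y := by
  intro y hy
  rcases List.mem_cons.mp hy with rfl | hy
  · exact le_refl y
  · exact (List.pairwise_cons.mp hs).1 y hy

-- equal multisets, one a heap, the other sorted: the accessed fronts coincide
lemma head_eq_of_heap_sorted (h s : List Int) (hH : IsHeap h)
    (hm : (h : Multiset Int) = (s : Multiset Int)) (hs : s.Pairwise (· ≤ ·))
    (hne : s ≠ []) : h.getD 0 0 = s.getD 0 0 := by
  rcases s with _ | ⟨z, t⟩
  · exact absurd rfl hne
  · have hlen : h.length = (z :: t).length := length_of_mset_eq hm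
    have hhne : 0 < h.length := by rw [hlen]; simp
    have hperm : h.Perm (z :: t) := Multiset.coe_eq_coe.mp hm
    have h0mem : h.getD 0 0 ∈ z :: t := hperm.mem_iff.mp (getD_mem h 0 hhne)
    have hzmem : z ∈ h := hperm.mem_iff.mpr (by simp)
    have h1 : z ≤ h.getD 0 0 := pairwise_head_le hs _ h0mem
    have h2 : h.getD 0 0 ≤ z := heap_root_le_mem h hH z hzmem
    have : h.getD 0 0 = z := le_antisymm h2 h1
    simpa using this

-- invariant of CPython's _siftdown bubble-up loop (with startpos = 0):
-- writing `item` at the hole `pos` yields a heap except possibly at the edge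
-- (pos, parent pos), and moreover the grandparent is ≤ the children of the hole
def SdInv (l : List Int) (pos : Nat) (item : Int) : Prop :=
  (∀ i : Nat, 0 < i → i < l.length → i ≠ pos →
      (l.set pos item).getD ((i - 1) / 2) 0 ≤ (l.set pos item).getD i 0) ∧
  (0 < pos → ∀ j : Nat, j < l.length → (j - 1) / 2 = pos →
      (l.set pos item).getD ((pos - 1) / 2) 0 ≤ (l.set pos item).getD j 0)

lemma siftdownAux_correct : ∀ (pos : Nat) (l : List Int) (item : Int),
    pos < l.length → SdInv l pos item →
    IsHeap (siftdownAux l 0 pos item) ∧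
      ((siftdownAux l 0 pos item : List Int) : Multiset Int)
        = ((l.set pos item : List Int) : Multiset Int) := by
  intro pos
  induction pos using Nat.strong_induction_on with
  | _ pos ih =>
    intro l item hpos hinv
    rw [siftdownAux]
    by_cases h0 : 0 < pos
    · simp only [dif_pos h0]
      set pp := (pos - 1) / 2 with hpp
      set parent := l.getD pp 0 with hpar
      have hpplt : pp < pos := by omega
      have hppl : pp < l.length := lt_trans hpplt hpos
      by_cases hlt : item < parent
      · simp only [if_pos hlt]
        -- recursive call on (l.set pos parent) at position pp
        have hlen : pp < (l.set pos parent).length := by simpa using hppl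
        have hinv' : SdInv (l.set pos parent) pp item := by
          constructor
          · intro i hi0 hil hip
            have hil' : i < l.length := by simpa using hil
            -- values of m' = (l.set pos parent).set pp item
            by_cases hipos : i = pos
            · -- edge (pos, pp): item ≤ parent
              subst hipos
              rw [show (i - 1) / 2 = pp from rfl]
              rw [getD_set_self _ pp item hlen,
                getD_set_ne _ pp i item (by omega), getD_set_self l i parent hpos]
              exact le_of_lt hlt
            · have hgi : ((l.set pos parent).set pp item).getD i 0 = l.getD i 0 := by
                rw [getD_set_ne _ pp i item (fun hh => hip hh.symm), getD_set_ne l pos i parent (fun hh => hipos hh.symm)]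
              by_cases hpi : (i - 1) / 2 = pos
              · -- i is a child of pos: use clause (ii) of hinv
                have := hinv.2 h0 i hil' hpi
                rw [getD_set_ne l pos i item (fun hh => hipos hh.symm)] at this
                rw [getD_set_ne l pos pp item (by omega)] at this
                rw [hpi, getD_set_ne _ pp pos item (by omega), getD_set_self l pos parent hpos]
                rw [hgi]
                exact this
              · by_cases hpi' : (i - 1) / 2 = pp
                · -- i is a child of pp (other than pos): item < parent = m[pp] ≤ m[i]
                  have := hinv.1 i hi0 hil' hipos
                  rw [getD_set_ne l pos i item (fun hh => hipos hh.symm)] at this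
                  rw [hpi', getD_set_ne l pos pp item (by omega)] at this
                  rw [hpi', getD_set_self _ pp item hlen, hgi]
                  exact le_trans (le_of_lt hlt) this
                · -- untouched edge
                  have := hinv.1 i hi0 hil' hipos
                  rw [getD_set_ne l pos i item (fun hh => hipos hh.symm),
                    getD_set_ne l pos _ item (fun hh => hpi hh.symm)] at this
                  rw [hgi, getD_set_ne _ pp _ item (fun hh => hpi' hh.symm),
                    getD_set_ne l pos _ parent (fun hh => hpi hh.symm)]
                  exact this
          · intro hpp0 j hjl hjpp
            have hjl' : j < l.length := by simpa using hjl
            have hjgt : pp < j := by omega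
            by_cases hjp : j = pos
            · -- j = pos: m'[pos] = parent = m[pp]; need m[pp's parent] ≤ m[pp]
              have := hinv.1 pp (by omega) hppl (by omega)
              rw [getD_set_ne l pos pp item (by omega),
                getD_set_ne l pos _ item (by omega)] at this
              rw [getD_set_ne _ pp _ item (by omega),
                getD_set_ne l pos _ parent (by omega),
                getD_set_ne _ pp j item (by omega), hjp, getD_set_self l pos parent hpos]
              exact this
            · -- j a sibling: m[pp's parent] ≤ m[pp] ≤ m[j]
              have e1 := hinv.1 pp (by omega) hppl (by omega)
              rw [getD_set_ne l pos pp item (by omega),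
                getD_set_ne l pos _ item (by omega)] at e1
              have e2 := hinv.1 j (by omega) hjl' hjp
              rw [getD_set_ne l pos j item (fun hh => hjp hh.symm), hjpp,
                getD_set_ne l pos pp item (by omega)] at e2
              rw [getD_set_ne _ pp _ item (by omega),
                getD_set_ne l pos _ parent (by omega),
                getD_set_ne _ pp j item (by omega),
                getD_set_ne l pos j parent (fun hh => hjp hh.symm)]
              exact le_trans e1 e2
        have hrec := ih pp hpplt (l.set pos parent) item hlen hinv'
        refine ⟨hrec.1, ?_⟩
        rw [hrec.2]
        exact mset_swap l pos pp item (by omega) hpos hppl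
      · simp only [if_neg hlt]
        constructor
        · intro i hi0 hil
          have hil' : i < l.length := by simpa using hil
          by_cases hip : i = pos
          · subst hip
            rw [getD_set_self l i item hpos]
            by_cases hq : (i - 1) / 2 = i
            · omega
            · rw [getD_set_ne l i _ item (fun hh => hq hh.symm)]
              exact le_of_not_gt (by simpa [hpar] using hlt)
          · exact hinv.1 i hi0 hil' hip
        · trivial
    · -- pos = 0: no parent edge
      have hp0 : pos = 0 := by omega
      simp only [dif_neg h0]
      constructor
      · intro i hi0 hil
        exact hinv.1 i hi0 (by simpa using hil) (by omega)
      · trivial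
-- invariant of CPython's _siftup descent (with startpos = 0): a heap except at the
-- edges touching the hole `pos`, and grandparent ≤ the children of the hole
def SuInv (l : List Int) (pos : Nat) : Prop :=
  (∀ i : Nat, 0 < i → i < l.length → i ≠ pos → (i - 1) / 2 ≠ pos →
      l.getD ((i - 1) / 2) 0 ≤ l.getD i 0) ∧
  (0 < pos → ∀ j : Nat, j < l.length → (j - 1) / 2 = pos →
      l.getD ((pos - 1) / 2) 0 ≤ l.getD j 0)

lemma siftupAux_correct : ∀ (n : Nat) (l : List Int) (pos : Nat) (item : Int),
    l.length - pos = n → pos < l.length → SuInv l pos →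
    IsHeap (siftupAux l l.length 0 pos item) ∧
      ((siftupAux l l.length 0 pos item : List Int) : Multiset Int)
        = ((l.set pos item : List Int) : Multiset Int) := by
  intro n
  induction n using Nat.strong_induction_on with
  | _ n ih =>
    intro l pos item hn hpos hinv
    rw [siftupAux]
    by_cases hch : 2 * pos + 1 < l.length
    · simp only [dif_pos hch]
      set c0 := 2 * pos + 1 with hc0
      set c := if c0 + 1 < l.length ∧ ¬ l.getD c0 0 < l.getD (c0 + 1) 0 then c0 + 1 else c0 with hc
      have hcrange : c0 ≤ c ∧ c < l.length ∧ c ≤ c0 + 1 := by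
        rw [hc]; split
        · next hcond => exact ⟨by omega, hcond.1, by omega⟩
        · exact ⟨le_refl _, hch, by omega⟩
      have hcpar : (c - 1) / 2 = pos := by omega
      have hcmin : ∀ j : Nat, 0 < j → j < l.length → (j - 1) / 2 = pos → j ≠ c → l.getD c 0 ≤ l.getD j 0 := by
        intro j hj0 hjl hjpar hjc
        have hj : j = c0 ∨ j = c0 + 1 := by omega
        rw [hc]
        split
        · next hcond =>
          rcases hj with rfl | rfl
          · exact le_of_not_gt (by exact hcond.2)
          · omega
        · next hcond =>
          rcases hj with rfl | rfl
          · omega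
          · rcases Decidable.not_and_iff_not_or_not.mp hcond with hbad | hgt
            · omega
            · exact le_of_lt (by simpa using hgt)
      -- the written list and recursion
      set l' := l.set pos (l.getD c 0) with hl'
      have hlen' : l'.length = l.length := by simp [hl']
      have hposc : pos < c := by omega
      have hinv' : SuInv l' c := by
        constructor
        · intro i hi0 hil hic hpic
          rw [hlen'] at hil
          by_cases hipos : i = pos
          · -- edge (pos, parent pos): l'[pos] = l[c], parent untouched
            subst hipos
            have hi0' : 0 < i := hi0
            rw [hl', getD_set_self l i _ hpos,
              getD_set_ne l i _ _ (by omega)]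
            exact hinv.2 hi0 c hcrange.2.1 hcpar
          · by_cases hpip : (i - 1) / 2 = pos
            · -- sibling of c under pos
              rw [hl', getD_set_ne l pos i _ (fun hh => hipos hh.symm), hpip,
                getD_set_self l pos _ hpos]
              exact hcmin i hi0 hil hpip hic
            · rw [hl', getD_set_ne l pos i _ (fun hh => hipos hh.symm),
                getD_set_ne l pos _ _ (fun hh => hpip hh.symm)]
              exact hinv.1 i hi0 hil hipos hpip
        · intro hc0lt j hjl hjc
          rw [hlen'] at hjl
          have hjgt : c < j := by omega
          rw [hcpar, hl', getD_set_self l pos _ hpos,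
            getD_set_ne l pos j _ (by omega)]
          have := hinv.1 j (by omega) hjl (by omega) (by omega)
          rw [hjc] at this
          exact this
      have hrec := ih (l.length - c) (by omega) l' c item (by rw [hlen'])
        (by rw [hlen']; exact hcrange.2.1) hinv'
      rw [show l'.length = l.length from hlen'] at hrec
      refine ⟨hrec.1, ?_⟩
      rw [hrec.2, hl']
      exact mset_swap l pos c item (by omega) hpos hcrange.2.1
    · -- no children: write item at pos and bubble up
      simp only [dif_neg hch]
      have hinv2 : SdInv (l.set pos item) pos item := by
        constructor
        · intro i hi0 hil hip
          rw [List.set_set]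
          have hil' : i < l.length := by simpa using hil
          have hpip : (i - 1) / 2 ≠ pos := by omega
          rw [getD_set_ne l pos i item (fun hh => hip hh.symm),
            getD_set_ne l pos _ item (fun hh => hpip hh.symm)]
          exact hinv.1 i hi0 hil' hip hpip
        · intro hp0 j hjl hjp
          have : (2 : Nat) * pos + 1 ≤ j := by omega
          have hjl' : j < l.length := by simpa using hjl
          omega
      have hres := siftdownAux_correct pos (l.set pos item) item (by simpa using hpos) hinv2
      rw [List.set_set] at hres
      exact hres
lemma getD_append_lt (l : List Int) (x : Int) (j : Nat) (h : j < l.length) :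
    (l ++ [x]).getD j 0 = l.getD j 0 := by
  simp [List.getD_eq_getElem?_getD, List.getElem?_append, h]

lemma getD_concat_self (l : List Int) (x : Int) : (l ++ [x]).getD l.length 0 = x := by
  simp [List.getD_eq_getElem?_getD]

lemma mset_concat (l : List Int) (x : Int) :
    ((l ++ [x] : List Int) : Multiset Int) = x ::ₘ (l : Multiset Int) := by
  rw [Multiset.cons_coe]
  exact Multiset.coe_eq_coe.mpr (List.perm_append_singleton x l)

lemma heappush_correct (l : List Int) (x : Int) (hH : IsHeap l) :
    IsHeap (heappush l x) ∧
      ((heappush l x : List Int) : Multiset Int) = x ::ₘ (l : Multiset Int) ∧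
      (heappush l x).length = l.length + 1 := by
  have hlen : (l ++ [x]).length - 1 = l.length := by simp
  have hpos : l.length < (l ++ [x]).length := by simp
  have hinv : SdInv (l ++ [x]) l.length x := by
    constructor
    · intro i hi0 hil hip
      have hil' : i < l.length := by
        simp only [List.length_append, List.length_cons, List.length_nil] at hil
        omega
      have hpi : (i - 1) / 2 < l.length := by omega
      rw [getD_set_ne _ _ i x (by omega), getD_set_ne _ _ _ x (by omega),
        getD_append_lt l x i hil', getD_append_lt l x _ hpi]
      exact hH i hi0 hil'
    · intro h0 j hjl hjp
      simp only [List.length_append, List.length_cons, List.length_nil] at hjl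
      omega
  have hres := siftdownAux_correct l.length (l ++ [x]) x hpos hinv
  have hsd : heappush l x = siftdownAux (l ++ [x]) 0 l.length x := by
    rw [heappush, siftdown, hlen, getD_concat_self]
  have hmset : ((heappush l x : List Int) : Multiset Int) = x ::ₘ (l : Multiset Int) := by
    rw [hsd, hres.2, mset_set _ _ _ (by simp), getD_concat_self, mset_concat,
      Multiset.erase_cons_head]
  refine ⟨by rw [hsd]; exact hres.1, hmset, ?_⟩
  have hcard := congrArg Multiset.card (hmset)
  rw [Multiset.card_cons, Multiset.coe_card, Multiset.coe_card] at hcard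
  omega

lemma getD_dropLast (l : List Int) (j : Nat) (h : j < l.dropLast.length) :
    l.dropLast.getD j 0 = l.getD j 0 := by
  rw [getD_eq_getElem _ j h, getD_eq_getElem l j (by simp at h; omega), List.getElem_dropLast]

lemma mset_dropLast (l : List Int) (hne : l ≠ []) :
    ((l : List Int) : Multiset Int) = l.getLast hne ::ₘ (l.dropLast : Multiset Int) := by
  conv_lhs => rw [← List.dropLast_concat_getLast hne]
  exact mset_concat _ _

lemma heappop_correct (l : List Int) (hH : IsHeap l) (hne : l ≠ []) :
    (heappop l).1 = l.getD 0 0 ∧ IsHeap (heappop l).2 ∧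
      ((heappop l).2 : Multiset Int) = ((l : Multiset Int)).erase (l.getD 0 0) ∧
      (heappop l).2.length + 1 = l.length := by
  have hlpos : 0 < l.length := List.length_pos_iff.mpr hne
  by_cases h1 : l.length = 1
  · obtain ⟨a, rfl⟩ := List.length_eq_one_iff.mp h1
    have hpa : heappop [a] = (a, []) := rfl
    rw [hpa]
    refine ⟨rfl, ?_, by simp, rfl⟩
    intro i hi0 hil; simp at hil
  · have hL : 2 ≤ l.length := by omega
    have hl1len : l.dropLast.length = l.length - 1 := by simp
    have hl1pos : 0 < l.dropLast.length := by omega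
    have hpop : heappop l = (l.dropLast.getD 0 0,
        siftup (l.dropLast.set 0 (l.getD (l.length - 1) 0)) 0) := by
      unfold heappop
      rw [if_pos (by omega : l.dropLast.length ≠ 0)]
    have hgl : l.getD (l.length - 1) 0 = l.getLast hne := by
      rw [List.getLast_eq_getElem, getD_eq_getElem l _ (by omega)]
    have hl2len : (l.dropLast.set 0 (l.getD (l.length - 1) 0)).length = l.dropLast.length := by
      simp
    have hsu : siftup (l.dropLast.set 0 (l.getD (l.length - 1) 0)) 0
        = siftupAux (l.dropLast.set 0 (l.getD (l.length - 1) 0))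
            (l.dropLast.set 0 (l.getD (l.length - 1) 0)).length 0 0 (l.getD (l.length - 1) 0) := by
      rw [siftup, getD_set_self l.dropLast 0 _ hl1pos]
    have hinv : SuInv (l.dropLast.set 0 (l.getD (l.length - 1) 0)) 0 := by
      constructor
      · intro i hi0 hil hip hpip
        rw [hl2len] at hil
        rw [getD_set_ne l.dropLast 0 i _ (by omega), getD_set_ne l.dropLast 0 _ _ (by omega),
          getD_dropLast l i hil, getD_dropLast l _ (by omega)]
        exact hH i hi0 (by omega)
      · intro h0; omega
    have hres := siftupAux_correct ((l.dropLast.set 0 (l.getD (l.length - 1) 0)).length - 0)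
      (l.dropLast.set 0 (l.getD (l.length - 1) 0)) 0 (l.getD (l.length - 1) 0) rfl
      (by rw [hl2len]; omega) hinv
    have hg0 : l.dropLast.getD 0 0 = l.getD 0 0 := getD_dropLast l 0 hl1pos
    have hmem0 : l.getD 0 0 ∈ l.dropLast := by rw [← hg0]; exact getD_mem l.dropLast 0 hl1pos
    have hmset : ((siftup (l.dropLast.set 0 (l.getD (l.length - 1) 0)) 0 : List Int) : Multiset Int)
        = ((l : Multiset Int)).erase (l.getD 0 0) := by
      rw [hsu, hres.2, List.set_set, mset_set l.dropLast 0 _ hl1pos, hg0,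
        mset_dropLast l hne, ← hgl]
      by_cases heq : l.getD 0 0 = l.getD (l.length - 1) 0
      · rw [← heq, Multiset.erase_cons_head]
        exact Multiset.cons_erase (by exact_mod_cast hmem0)
      · rw [Multiset.erase_cons_tail _ (fun hh => heq hh.symm)]
    have hcard := congrArg Multiset.card hmset
    rw [Multiset.coe_card, Multiset.card_erase_of_mem (by exact_mod_cast getD_mem l 0 hlpos),
      Multiset.coe_card, Nat.pred_eq_sub_one] at hcard
    refine ⟨by rw [hpop]; exact hg0, by rw [hpop]; rw [hsu]; exact hres.1,
      by rw [hpop]; exact hmset, ?_⟩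
    rw [hpop]
    show (siftup (l.dropLast.set 0 (l.getD (l.length - 1) 0)) 0).length + 1 = l.length
    omega
-- facts about B's ordered insert
lemma insort_mset (l : List Int) (x : Int) :
    ((insortList l x : List Int) : Multiset Int) = x ::ₘ (l : Multiset Int) := by
  induction l with
  | nil => rfl
  | cons y ys ih =>
    rw [insortList]
    split
    · rfl
    · show ((y :: insortList ys x : List Int) : Multiset Int) = _
      rw [← Multiset.cons_coe, ih, ← Multiset.cons_coe, Multiset.cons_swap]

lemma insort_mem (l : List Int) (x a : Int) (h : a ∈ insortList l x) : a = x ∨ a ∈ l := by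
  have : a ∈ (x ::ₘ (l : Multiset Int)) := by rw [← insort_mset]; exact_mod_cast h
  rcases Multiset.mem_cons.mp this with h | h
  · exact Or.inl h
  · exact Or.inr (by exact_mod_cast h)

lemma insort_pairwise (l : List Int) (x : Int) (h : l.Pairwise (· ≤ ·)) :
    (insortList l x).Pairwise (· ≤ ·) := by
  induction l with
  | nil => simp [insortList]
  | cons y ys ih =>
    rw [insortList]
    rcases List.pairwise_cons.mp h with ⟨hy, hys⟩
    split
    · next hlt =>
      exact List.pairwise_cons.mpr ⟨by
        intro a ha
        rcases List.mem_cons.mp ha with rfl | ha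
        · exact le_of_lt hlt
        · exact le_trans (le_of_lt hlt) (hy a ha), h⟩
    · next hge =>
      refine List.pairwise_cons.mpr ⟨?_, ih hys⟩
      intro a ha
      rcases insort_mem ys x a ha with rfl | ha
      · exact le_of_not_gt (by simpa using hge)
      · exact hy a ha

-- building the initial heap
lemma foldl_push (xs : List Int) : ∀ acc : List Int, IsHeap acc →
    IsHeap (xs.foldl (fun h i => heappush h i) acc) ∧
      ((xs.foldl (fun h i => heappush h i) acc : List Int) : Multiset Int)
        = (acc : Multiset Int) + (xs : Multiset Int) := by
  induction xs with
  | nil => intro acc hacc; exact ⟨hacc, by simp⟩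
  | cons x xs ih =>
    intro acc hacc
    have hp := heappush_correct acc x hacc
    have := ih (heappush acc x) hp.1
    refine ⟨this.1, ?_⟩
    rw [List.foldl_cons] at *
    rw [this.2, hp.2.1]
    rw [show ((x :: xs : List Int) : Multiset Int) = x ::ₘ (xs : Multiset Int) from rfl]
    rw [Multiset.cons_add, Multiset.add_cons]
-- the two loops agree, state related by: equal multisets, A's a heap, B's sorted
lemma loop_eq (K : Int) : ∀ (fuel : Nat) (h s : List Int) (ans : Int),
    h.length = fuel → IsHeap h → ((h : List Int) : Multiset Int) = (s : Multiset Int) →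
    s.Pairwise (· ≤ ·) →
    (2 ≤ h.length ∨ (h.length = 1 ∧ ¬ h.getD 0 0 < K)) →
    solLoopA K fuel h ans = bLoop K s ans := by
  intro fuel
  induction fuel with
  | zero =>
    intro h s ans hlen _ _ _ hE
    omega
  | succ fuel ih =>
    intro h s ans hlen hH hm hs hE
    have hslen : s.length = h.length := (length_of_mset_eq hm).symm
    rcases s with _ | ⟨x, t⟩
    · simp at hslen; omega
    rcases t with _ | ⟨y, rest⟩
    · -- single element left: both loops exit (Pre_/guard rules out head < K here)
      have h1 : h.length = 1 := by simpa using hslen.symm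
      have hx : h.getD 0 0 = x :=
        head_eq_of_heap_sorted h [x] hH hm hs (by simp)
      have hnK : ¬ h.getD 0 0 < K := by
        rcases hE with h2 | h2
        · omega
        · exact h2.2
      simp only [solLoopA, bLoop]
      rw [if_neg hnK]
    · -- at least two elements
      have hlen2 : 2 ≤ h.length := by simp at hslen; omega
      have hx : h.getD 0 0 = x :=
        head_eq_of_heap_sorted h (x :: y :: rest) hH hm hs (by simp)
      have hsy : (y :: rest).Pairwise (· ≤ ·) := (List.pairwise_cons.mp hs).2
      have hsr : rest.Pairwise (· ≤ ·) := (List.pairwise_cons.mp hsy).2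
      by_cases hxK : x < K
      · have hpop1 := heappop_correct h hH (by intro hh; rw [hh] at hlen2; simp at hlen2)
        have hmx : ((h : List Int) : Multiset Int)
            = x ::ₘ ((y :: rest : List Int) : Multiset Int) := by rw [hm]; rfl
        have hm1 : (((heappop h).2 : List Int) : Multiset Int)
            = ((y :: rest : List Int) : Multiset Int) := by
          rw [hpop1.2.2.1, hx, hmx, Multiset.erase_cons_head]
        have hlen1 : (heappop h).2.length = h.length - 1 := by omega
        have hne1 : (heappop h).2 ≠ [] := by
          intro hh; rw [hh] at hlen1; simp at hlen1; omega
        have hpop2 := heappop_correct (heappop h).2 hpop1.2.1 hne1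
        have hy : (heappop h).2.getD 0 0 = y :=
          head_eq_of_heap_sorted (heappop h).2 (y :: rest) hpop1.2.1 hm1 hsy (by simp)
        have hm2 : (((heappop (heappop h).2).2 : List Int) : Multiset Int)
            = ((rest : List Int) : Multiset Int) := by
          rw [hpop2.2.2.1, hy, hm1,
            show ((y :: rest : List Int) : Multiset Int) = y ::ₘ (rest : Multiset Int) from rfl,
            Multiset.erase_cons_head]
        have hpush := heappush_correct (heappop (heappop h).2).2
          ((heappop h).1 + (heappop (heappop h).2).1 * 2) hpop2.2.1
        have hcomb : (heappop h).1 + (heappop (heappop h).2).1 * 2 = x + y * 2 := by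
          rw [hpop1.1, hpop2.1, hx, hy]
        have hm3 : ((heappush (heappop (heappop h).2).2
              ((heappop h).1 + (heappop (heappop h).2).1 * 2) : List Int) : Multiset Int)
            = ((insortList rest (x + y * 2) : List Int) : Multiset Int) := by
          rw [hpush.2.1, hcomb, insort_mset, hm2]
        have hrlen : rest.length = h.length - 2 := by simp at hslen; omega
        have hlen3 : (heappush (heappop (heappop h).2).2
            ((heappop h).1 + (heappop (heappop h).2).1 * 2)).length = fuel := by
          rw [hpush.2.2]; omega
        have hnlen : (insortList rest (x + y * 2)).length = fuel := by
          rw [insortList_length]; omega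
        have hfuel1 : 1 ≤ fuel := by omega
        have hnne : insortList rest (x + y * 2) ≠ [] := by
          intro hh; rw [hh] at hnlen; simp at hnlen; omega
        have hnpair := insort_pairwise rest (x + y * 2) hsr
        have hhead3 : (heappush (heappop (heappop h).2).2
              ((heappop h).1 + (heappop (heappop h).2).1 * 2)).getD 0 0
            = (insortList rest (x + y * 2)).getD 0 0 :=
          head_eq_of_heap_sorted _ _ hpush.1 hm3 hnpair hnne
        simp only [solLoopA, bLoop]
        rw [hx, if_pos hxK, if_pos hxK, hlen3, hhead3, hnlen]
        by_cases hg : fuel < 2 ∧ (insortList rest (x + y * 2)).getD 0 0 < K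
        · rw [if_pos hg, if_pos hg]
        · rw [if_neg hg, if_neg hg]
          exact ih _ _ (ans + 1) hlen3 hpush.1 hm3 hnpair
            (by rw [hlen3, hhead3]; omega)
      · simp only [solLoopA, bLoop]
        rw [hx, if_neg hxK, if_neg hxK]

-- ===== VERDICT (by name: the statement is the Claim_ definition above) =====
theorem solution_spec : Claim_equal_solution := by
  unfold Claim_equal_solution
  intro scoville K _ hpre
  unfold Spec_solution solution solution_alt
  obtain ⟨hne, hone⟩ := hpre
  have hfold := foldl_push scoville [] (by intro i hi0 hil; simp at hil)
  have hmF : ((scoville.foldl (fun h i => heappush h i) [] : List Int) : Multiset Int)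
      = (scoville : Multiset Int) := by rw [hfold.2]; simp
  have hperm : (PySem.List.sorted scoville (fun v => v) false).Perm scoville :=
    PySem.List.sorted_perm scoville (fun v => v) false
  have hmS : ((scoville.foldl (fun h i => heappush h i) [] : List Int) : Multiset Int)
      = ((PySem.List.sorted scoville (fun v => v) false : List Int) : Multiset Int) := by
    rw [hmF]; exact (Multiset.coe_eq_coe.mpr hperm).symm
  have hpair : (PySem.List.sorted scoville (fun v => v) false).Pairwise (· ≤ ·) := by
    have := PySem.List.sorted_pairwise scoville (fun v => v)
    simpa using this
  have hlenF : (scoville.foldl (fun h i => heappush h i) []).length = scoville.length := by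
    have := congrArg Multiset.card hmF
    rwa [Multiset.coe_card, Multiset.coe_card] at this
  have hlpos : 0 < scoville.length := List.length_pos_iff.mpr hne
  have hentry : 2 ≤ (scoville.foldl (fun h i => heappush h i) []).length ∨
      ((scoville.foldl (fun h i => heappush h i) []).length = 1 ∧
        ¬ (scoville.foldl (fun h i => heappush h i) []).getD 0 0 < K) := by
    by_cases h2 : 2 ≤ scoville.length
    · exact Or.inl (by omega)
    · have h1 : scoville.length = 1 := by omega
      obtain ⟨a, rfl⟩ := List.length_eq_one_iff.mp h1
      have heq : ([a] : List Int).foldl (fun h i => heappush h i) [] = [a] :=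
        List.perm_singleton.mp (Multiset.coe_eq_coe.mp hmF)
      rw [heq]
      right
      refine ⟨rfl, ?_⟩
      have := hone rfl
      simp at this ⊢
      omega
  exact loop_eq K scoville.length (scoville.foldl (fun h i => heappush h i) [])
    (PySem.List.sorted scoville (fun v => v) false) 0 hlenF hfold.1 hmS hpair hentry
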